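-- pv_equiv track=rewrite | github.com/VelundLazyCat/PythonCore | Module_7/m7_z7.py | data_preparation
-- ===== SOURCE A (Python) =====
-- def data_preparation(list_data):
--     new_data=[]
--     for i in list_data:
--         if len(i)>2:
--             i=i.copy()
--             i.sort()
--             i.pop(0)
--             i.pop(-1)
--             new_data.extend(i)
--         else:
--             new_data.extend(i)
--     new_data.sort(reverse=True)
--     return new_data
-- ===== SOURCE B (Python) =====
-- def data_preparation(list_data):
--     result = []
--     for sub in list_data:
--         if len(sub) > 2:
--             c = sub.copy()
--             mn = min(c)
--             mx = max(c)
--             c.remove(mn)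
--             c.remove(mx)
--             result.extend(c)
--         else:
--             result.extend(sub)
--     return list(reversed(sorted(result)))
-- ===== Notes on version B (the rewrite author's own statement) =====
-- stated objective: alternative
-- what changed: Per sublist, B removes one min and one max found by a direct scan instead of sorting the sublist and popping its ends, and builds the descending output by reversing an ascending sort.
import Mathlib
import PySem

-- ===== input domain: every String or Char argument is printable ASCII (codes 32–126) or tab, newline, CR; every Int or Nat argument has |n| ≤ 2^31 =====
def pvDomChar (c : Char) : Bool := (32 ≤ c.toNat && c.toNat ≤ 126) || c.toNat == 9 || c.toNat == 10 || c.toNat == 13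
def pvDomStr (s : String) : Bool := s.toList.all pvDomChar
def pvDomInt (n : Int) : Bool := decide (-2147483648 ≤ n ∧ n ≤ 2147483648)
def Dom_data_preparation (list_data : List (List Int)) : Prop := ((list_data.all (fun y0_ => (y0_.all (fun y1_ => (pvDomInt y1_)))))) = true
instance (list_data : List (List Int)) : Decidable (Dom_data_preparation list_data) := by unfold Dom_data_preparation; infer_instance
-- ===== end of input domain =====

-- B replaces A's per-sublist sort/pop(0)/pop(-1) by a direct min/max scan and removal (no inner sort),
-- and produces the descending result as the reverse of an ascending sort (objective: alternative).

-- ===== PORT A =====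
-- A: for each sublist longer than 2, sort a copy, pop first and last, extend; finally sort descending.
def data_preparation (list_data : List (List Int)) : List Int :=
  let new_data := list_data.foldl (fun new_data i =>
    if 2 < i.length then
      let i := PySem.List.sorted i (fun x => x) false
      match PySem.List.pop? i 0 with
      | none => new_data            -- unreachable (len > 2): totality guard
      | some (_, i) =>
        match PySem.List.pop? i (-1) with
        | none => new_data          -- unreachable: totality guard
        | some (_, i) => new_data ++ i
    else new_data ++ i) []
  PySem.List.sorted new_data (fun x => x) true

-- ===== PORT B =====
-- B: for each sublist longer than 2, remove one min and one max from a copy, extend; reverse the ascending sort.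
def data_preparation_alt (list_data : List (List Int)) : List Int :=
  let result := list_data.foldl (fun result sub =>
    if 2 < sub.length then
      match PySem.List.min? sub (fun x => x), PySem.List.max? sub (fun x => x) with
      | some mn, some mx =>
        match PySem.List.remove? sub mn with
        | none => result            -- unreachable: totality guard
        | some c =>
          match PySem.List.remove? c mx with
          | none => result          -- unreachable: totality guard
          | some c => result ++ c
      | _, _ => result              -- unreachable (sub nonempty): totality guard
    else result ++ sub) []
  (PySem.List.sorted result (fun x => x) false).reverse

-- ===== PRECONDITION & SPEC =====
def Spec_data_preparation (list_data : List (List Int)) (out : List Int) : Prop := out = data_preparation_alt list_data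
instance (list_data : List (List Int)) (out : List Int) : Decidable (Spec_data_preparation list_data out) := by unfold Spec_data_preparation; infer_instance

-- ===== CLAIM (what is proved, stated in full; the proofs are below) =====
def Claim_equal_data_preparation : Prop := ∀ (list_data : List (List Int)), Dom_data_preparation list_data → Spec_data_preparation list_data (data_preparation list_data)

-- ===== LEMMAS AND PROOFS =====

-- the per-sublist contribution of A's loop body
def pieceA (i : List Int) : List Int :=
  if 2 < i.length then ((PySem.List.sorted i (fun x => x) false).tail).dropLast else i

-- the per-sublist contribution of B's loop body
def pieceB (i : List Int) : List Int :=
  if 2 < i.length then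
    match PySem.List.min? i (fun x => x), PySem.List.max? i (fun x => x) with
    | some mn, some mx => (i.erase mn).erase mx
    | _, _ => []
  else i

lemma bodyA_eq (acc i : List Int) :
    (if 2 < i.length then
      let s := PySem.List.sorted i (fun x => x) false
      match PySem.List.pop? s 0 with
      | none => acc
      | some (_, s) =>
        match PySem.List.pop? s (-1) with
        | none => acc
        | some (_, s) => acc ++ s
    else acc ++ i) = acc ++ pieceA i := by
  unfold pieceA
  by_cases h : 2 < i.length
  · simp only [h, if_pos]
    rcases hS : PySem.List.sorted i (fun x => x) false with _ | ⟨x, t⟩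
    · have := PySem.List.length_sorted i (fun x => x) false
      rw [hS] at this; simp at this; omega
    · have hlen : (x :: t).length = i.length := by
        rw [← hS]; exact PySem.List.length_sorted i _ false
      have htne : t ≠ [] := by intro ht; rw [ht] at hlen; simp at hlen; omega
      rw [PySem.List.pop?_zero_cons]
      have ht' : t = t.dropLast ++ [t.getLast htne] := (List.dropLast_append_getLast htne).symm
      dsimp only
      conv_lhs => rw [ht']
      rw [PySem.List.pop?_last]
      simp
  · simp [h]

lemma bodyB_eq (acc i : List Int) :
    (if 2 < i.length then
      match PySem.List.min? i (fun x => x), PySem.List.max? i (fun x => x) with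
      | some mn, some mx =>
        match PySem.List.remove? i mn with
        | none => acc
        | some c =>
          match PySem.List.remove? c mx with
          | none => acc
          | some c => acc ++ c
      | _, _ => acc
    else acc ++ i) = acc ++ pieceB i := by
  unfold pieceB
  by_cases h : 2 < i.length
  · simp only [h, if_pos]
    have hne : i ≠ [] := by intro hi; rw [hi] at h; simp at h
    rcases hmn : PySem.List.min? i (fun x => x) with _ | mn
    · exact absurd ((PySem.List.min?_eq_none_iff i _).mp hmn) hne
    rcases hmx : PySem.List.max? i (fun x => x) with _ | mx
    · exact absurd ((PySem.List.max?_eq_none_iff i _).mp hmx) hne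
    have hmni : mn ∈ i := PySem.List.min?_mem hmn
    have hmxe : mx ∈ i.erase mn := by
      by_cases hem : mx = mn
      · -- all elements equal; the erase still holds at least two of them
        have hlen : (i.erase mn).length = i.length - 1 := List.length_erase_of_mem hmni
        rcases he : i.erase mn with _ | ⟨y, ys⟩
        · rw [he] at hlen; simp at hlen; omega
        have hy : y ∈ i := List.mem_of_mem_erase (by rw [he]; exact List.mem_cons_self)
        have h1 : mn ≤ y := PySem.List.min?_isMin hmn y hy
        have h2 : y ≤ mx := PySem.List.max?_isMax hmx y hy
        have : y = mx := by omega
        rw [← this]; exact List.mem_cons_self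
      · exact (List.mem_erase_of_ne hem).mpr (PySem.List.max?_mem hmx)
    dsimp only
    rw [PySem.List.remove?_eq_some_erase i mn hmni]
    dsimp only
    rw [PySem.List.remove?_eq_some_erase _ mx hmxe]
  · simp [h]

lemma pieceA_perm_pieceB (i : List Int) : (pieceA i).Perm (pieceB i) := by
  unfold pieceA pieceB
  by_cases h : 2 < i.length
  · simp only [h, if_pos]
    have hne : i ≠ [] := by intro hi; rw [hi] at h; simp at h
    rcases hmn : PySem.List.min? i (fun x => x) with _ | mn
    · exact absurd ((PySem.List.min?_eq_none_iff i _).mp hmn) hne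
    rcases hmx : PySem.List.max? i (fun x => x) with _ | mx
    · exact absurd ((PySem.List.max?_eq_none_iff i _).mp hmx) hne
    have hmni : mn ∈ i := PySem.List.min?_mem hmn
    have hmxi : mx ∈ i := PySem.List.max?_mem hmx
    dsimp only
    rcases hS : PySem.List.sorted i (fun x => x) false with _ | ⟨x, t⟩
    · have := PySem.List.length_sorted i (fun x => x) false
      rw [hS] at this; simp at this; omega
    have hperm : (x :: t).Perm i := hS ▸ PySem.List.sorted_perm i (fun x => x) false
    have hlen : (x :: t).length = i.length := hperm.length_eq
    have htne : t ≠ [] := by intro ht; rw [ht] at hlen; simp at hlen; omega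
    -- head of the sorted list carries the value of the min
    have hxmn : x = mn := by
      have h1 : ∀ y ∈ i, x ≤ y := PySem.List.key_head_sorted_le i (fun x => x) hS
      have h2 : x ∈ i := hperm.subset List.mem_cons_self
      have h3 : mn ≤ x := PySem.List.min?_isMin hmn x h2
      have h4 : x ≤ mn := h1 mn hmni
      omega
    -- split the tail as dropLast ++ [getLast]; the last entry carries the value of the max
    have ht' : t = t.dropLast ++ [t.getLast htne] := (List.dropLast_append_getLast htne).symm
    have hpw : (x :: t).Pairwise (fun a b : Int => a ≤ b) :=
      hS ▸ PySem.List.sorted_pairwise i (fun x => x)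
    rw [ht'] at hpw hperm ⊢
    have hgmx : t.getLast htne = mx := by
      have hg1 : t.getLast htne ∈ i := hperm.subset (by simp)
      have hle : t.getLast htne ≤ mx := PySem.List.max?_isMax hmx _ hg1
      have hmem : mx ∈ x :: (t.dropLast ++ [t.getLast htne]) := hperm.mem_iff.mpr hmxi
      simp only [List.pairwise_cons, List.pairwise_append] at hpw
      obtain ⟨hx_all, _, hlast_all, hd_all⟩ := hpw
      have hge : mx ≤ t.getLast htne := by
        rcases List.mem_cons.mp hmem with hc | hc
        · rw [hc]; exact hx_all _ (by simp)
        rcases List.mem_append.mp hc with hd | hl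
        · exact hd_all _ hd _ (by simp)
        · simp at hl; omega
      omega
    -- multiset bookkeeping: both sides are i minus one min and one max
    rw [← Multiset.coe_eq_coe]
    have hcoe : (i : Multiset Int) = ((x :: (t.dropLast ++ [t.getLast htne]) : List Int) : Multiset Int) :=
      (Multiset.coe_eq_coe.mpr hperm).symm
    calc (((x :: (t.dropLast ++ [t.getLast htne])).tail.dropLast : List Int) : Multiset Int)
        = (t.dropLast : Multiset Int) := by simp
      _ = (((i.erase mn).erase mx : List Int) : Multiset Int) := by
          rw [← Multiset.coe_erase, ← Multiset.coe_erase, hcoe, hxmn, hgmx]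
          have : ((mn :: (t.dropLast ++ [mx]) : List Int) : Multiset Int)
              = mn ::ₘ ((t.dropLast : Multiset Int) + {mx}) := rfl
          rw [this, Multiset.erase_cons_head, add_comm, Multiset.singleton_add,
              Multiset.erase_cons_head]
  · simp [h]

lemma flatMap_perm (l : List (List Int)) : (l.flatMap pieceA).Perm (l.flatMap pieceB) := by
  induction l with
  | nil => exact List.Perm.refl _
  | cons x xs ih => simpa using List.Perm.append (pieceA_perm_pieceB x) ih

lemma sorted_rev_eq_reverse (xs : List Int) :
    PySem.List.sorted xs (fun x => x) true = (PySem.List.sorted xs (fun x => x) false).reverse := by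
  have h1 : (PySem.List.sorted xs (fun x => x) true).reverse.Perm
      (PySem.List.sorted xs (fun x => x) false) :=
    ((List.reverse_perm _).trans (PySem.List.sorted_perm xs _ true)).trans
      (PySem.List.sorted_perm xs _ false).symm
  have h2 : List.Pairwise (fun a b : Int => a ≤ b)
      (PySem.List.sorted xs (fun x => x) true).reverse :=
    List.pairwise_reverse.mpr (PySem.List.sorted_pairwise_rev xs (fun x => x))
  have h3 : List.Pairwise (fun a b : Int => a ≤ b)
      (PySem.List.sorted xs (fun x => x) false) :=
    PySem.List.sorted_pairwise xs (fun x => x)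
  have := PySem.List.eq_of_perm_of_pairwise_le_of_injective (fun x => x)
    (fun _ _ h => h) h1 h2 h3
  rw [← this, List.reverse_reverse]

-- ===== VERDICT (by name: the statement is the Claim_ definition above) =====
theorem data_preparation_spec : Claim_equal_data_preparation := by
  intro list_data _
  unfold Spec_data_preparation data_preparation data_preparation_alt
  rw [show (fun (new_data i : List Int) =>
      if 2 < i.length then
        let i' := PySem.List.sorted i (fun x => x) false
        match PySem.List.pop? i' 0 with
        | none => new_data
        | some (_, i) =>
          match PySem.List.pop? i (-1) with
          | none => new_data
          | some (_, i) => new_data ++ i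
      else new_data ++ i) = (fun acc i => acc ++ pieceA i) from
    funext fun a => funext fun i => bodyA_eq a i]
  rw [show (fun (result sub : List Int) =>
      if 2 < sub.length then
        match PySem.List.min? sub (fun x => x), PySem.List.max? sub (fun x => x) with
        | some mn, some mx =>
          match PySem.List.remove? sub mn with
          | none => result
          | some c =>
            match PySem.List.remove? c mx with
            | none => result
            | some c => result ++ c
        | _, _ => result
      else result ++ sub) = (fun acc i => acc ++ pieceB i) from
    funext fun a => funext fun i => bodyB_eq a i]
  rw [PySem.List.foldl_append_eq_flatMap, PySem.List.foldl_append_eq_flatMap]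
  simp only [List.nil_append]
  rw [sorted_rev_eq_reverse,
      PySem.List.sorted_eq_sorted_of_perm _ _ (fun x => x) (fun _ _ h => h) (flatMap_perm list_data)]
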